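-- pv_equiv track=rewrite | github.com/rsprenkels/kattis | python/1_7/peragrams.py | chars_to_peragram
-- ===== SOURCE A (Python) =====
-- from collections import defaultdict
--
-- def chars_to_peragram(word: str) -> int:
--     letter_freq = defaultdict(int)
--     for letter in word:
--         letter_freq[letter] += 1
--     need_removing = {k:v % 2 for k,v in letter_freq.items() if v % 2 == 1}
--     if len(need_removing) == 0:
--         return 0
--     else:
--         return len(need_removing) - 1
-- ===== SOURCE B (Python) =====
-- def chars_to_peragram(word: str) -> int:
--     mask = 0
--     for c in word:
--         mask ^= 1 << ord(c)
--     ones = 0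
--     while mask:
--         ones += mask & 1
--         mask >>= 1
--     return max(0, ones - 1)
-- ===== Notes on version B (the rewrite author's own statement) =====
-- stated objective: alternative
-- what changed: Replaces the frequency-dict build plus odd-filter comprehension by a parity bitmask: one pass XOR-toggling bit ord(c), then a bit-shift popcount loop; answer is max(0, popcount-1).
import Mathlib
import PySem

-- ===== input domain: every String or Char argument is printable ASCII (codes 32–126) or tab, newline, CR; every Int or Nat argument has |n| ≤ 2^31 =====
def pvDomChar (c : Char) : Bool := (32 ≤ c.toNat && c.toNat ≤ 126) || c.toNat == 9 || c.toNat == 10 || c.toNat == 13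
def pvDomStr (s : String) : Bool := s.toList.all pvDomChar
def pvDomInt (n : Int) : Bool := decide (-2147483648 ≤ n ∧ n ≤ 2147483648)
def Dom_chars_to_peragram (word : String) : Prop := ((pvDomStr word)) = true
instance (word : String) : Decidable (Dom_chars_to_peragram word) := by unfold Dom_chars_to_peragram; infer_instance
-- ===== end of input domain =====

-- B replaces A's frequency-dict build + odd-filter comprehension by a parity BITMASK: XOR-toggle bit ord(c) per character, then a shift-loop popcount; same O(n) cost, different data structure.

-- ===== PORT A =====
def chars_to_peragram (word : String) : Int :=
  let letter_freq := word.toList.foldl (fun d c => d.modify c 0 (· + 1)) PySem.Dict.empty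
  let need_removing :=
    (letter_freq.items.filter (fun kv => PySem.Int.mod kv.2 2 == 1)).foldl
      (fun d kv => d.insert kv.1 (PySem.Int.mod kv.2 2)) PySem.Dict.empty
  if need_removing.size = 0 then 0 else (need_removing.size : Int) - 1

-- ===== PORT B =====
-- B's popcount loop: 'while mask: ones += mask & 1; mask >>= 1'
def pvPopcount (n : Nat) : Nat :=
  if h : n = 0 then 0 else n % 2 + pvPopcount (n / 2)
decreasing_by exact Nat.div_lt_self (Nat.pos_of_ne_zero h) one_lt_two

def chars_to_peragram_alt (word : String) : Int :=
  let mask := word.toList.foldl (fun m c => m ^^^ (1 <<< c.toNat)) 0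
  max 0 ((pvPopcount mask : Int) - 1)

-- ===== PRECONDITION & SPEC =====
def Spec_chars_to_peragram (word : String) (out : Int) : Prop := out = chars_to_peragram_alt word
instance (word : String) (out : Int) : Decidable (Spec_chars_to_peragram word out) := by unfold Spec_chars_to_peragram; infer_instance

-- ===== CLAIM (what is proved, stated in full; the proofs are below) =====
def Claim_equal_chars_to_peragram : Prop := ∀ (word : String), Dom_chars_to_peragram word → Spec_chars_to_peragram word (chars_to_peragram word)

-- ===== LEMMAS AND PROOFS =====

-- Char is determined by its code point.
lemma char_toNat_inj {a b : Char} (h : a.toNat = b.toNat) : a = b :=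
  Char.ext (UInt32.toNat.inj h)

-- Bit i of the XOR-fold flips the initial bit exactly when the number of characters of code i is odd.
lemma xor_fold_testBit (cs : List Char) : ∀ (m i : Nat),
    (cs.foldl (fun m c => m ^^^ (1 <<< c.toNat)) m).testBit i
      = ((m.testBit i).xor (decide ((cs.countP (fun c => c.toNat == i)) % 2 = 1))) := by
  induction cs with
  | nil => intro m i; simp
  | cons c rest ih =>
    intro m i
    rw [List.foldl_cons, ih, List.countP_cons, Nat.testBit_xor, Nat.one_shiftLeft,
      Nat.testBit_two_pow]
    by_cases hc : c.toNat = i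
    · subst hc
      by_cases hk : rest.countP (fun x => x.toNat == c.toNat) % 2 = 1
      · have h1 : ¬ ((rest.countP (fun x => x.toNat == c.toNat) + 1) % 2 = 1) := by omega
        cases m.testBit c.toNat <;> simp [hk, h1]
      · have h1 : (rest.countP (fun x => x.toNat == c.toNat) + 1) % 2 = 1 := by omega
        cases m.testBit c.toNat <;> simp [hk, h1]
    · simp [hc, beq_iff_eq]

-- The XOR-fold stays below 2^128 when every character code is below 128.
lemma xor_fold_lt (cs : List Char) (hcs : ∀ c ∈ cs, c.toNat < 128) :
    ∀ (m : Nat), m < 2 ^ 128 → (cs.foldl (fun m c => m ^^^ (1 <<< c.toNat)) m) < 2 ^ 128 := by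
  induction cs with
  | nil => intro m hm; simpa using hm
  | cons c rest ih =>
    intro m hm
    simp only [List.foldl_cons]
    refine ih (fun x hx => hcs x (List.mem_cons_of_mem _ hx)) _ ?_
    refine Nat.xor_lt_two_pow hm ?_
    rw [Nat.one_shiftLeft]
    exact Nat.pow_lt_pow_right one_lt_two (hcs c (List.mem_cons_self))

-- pvPopcount counts the set bits below any bound dominating n.
lemma pvPopcount_eq_filter_length : ∀ (k n : Nat), n < 2 ^ k →
    pvPopcount n = ((List.range k).filter (fun i => n.testBit i)).length := by
  intro k
  induction k with
  | zero =>
    intro n hn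
    interval_cases n
    simp [pvPopcount]
  | succ k ih =>
    intro n hn
    rw [pvPopcount]
    split_ifs with h0
    · subst h0; simp
    · have hdiv : n / 2 < 2 ^ k := by
        have := Nat.pow_succ 2 k ▸ hn; omega
      rw [ih (n / 2) hdiv, List.range_succ_eq_map]
      simp only [List.filter_cons, List.filter_map, Nat.testBit_zero]
      have hb : ((fun i => n.testBit i) ∘ Nat.succ) = (fun i => (n / 2).testBit i) := by
        funext i; simp [Function.comp, Nat.testBit_succ]
      rw [hb]
      have heta : (List.filter (fun i => (n / 2).testBit i) (List.range k)).length
          = (List.filter ((n / 2).testBit) (List.range k)).length := rfl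
      by_cases hp : n % 2 = 1
      · simp [hp]; omega
      · simp [hp]; omega

-- A's distinct-odd-letter list and the set-bit indices of B's mask are the same finite set.
lemma odd_list_length_eq_bits (cs : List Char) (hcs : ∀ c ∈ cs, c.toNat < 128) :
    ((PySem.Set.ofList cs).filter (fun k => PySem.Int.mod (cs.count k : Int) 2 == 1)).length
      = pvPopcount (cs.foldl (fun m c => m ^^^ (1 <<< c.toNat)) 0) := by
  set mask := cs.foldl (fun m c => m ^^^ (1 <<< c.toNat)) 0 with hmask
  set L := (PySem.Set.ofList cs).filter (fun k => PySem.Int.mod (cs.count k : Int) 2 == 1) with hL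
  rw [pvPopcount_eq_filter_length 128 mask (xor_fold_lt cs hcs 0 (Nat.two_pow_pos 128))]
  -- both lists are nodup and have the same members, via Char.toNat
  have hcount : ∀ x : Char, cs.count x = cs.countP (fun c => c.toNat == x.toNat) := by
    intro x
    unfold List.count
    refine List.countP_congr ?_
    intro c _
    constructor
    · intro h; have := beq_iff_eq.mp h; simp [this]
    · intro h; have : c.toNat = x.toNat := by simpa using h
      exact beq_iff_eq.mpr (char_toNat_inj this)
  have hbit : ∀ i : Nat, mask.testBit i = decide ((cs.countP (fun c => c.toNat == i)) % 2 = 1) := by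
    intro i
    rw [hmask, xor_fold_testBit cs 0 i]
    simp
  have hmemL : ∀ x : Char, x ∈ L ↔ (x ∈ cs ∧ cs.count x % 2 = 1) := by
    intro x
    rw [hL]
    simp only [List.mem_filter, PySem.Set.mem_ofList, beq_iff_eq]
    constructor
    · rintro ⟨hx, hmod⟩
      refine ⟨hx, ?_⟩
      have := PySem.Int.mod_eq_emod_of_pos (a := (cs.count x : Int)) (by norm_num : (0:Int) < 2)
      omega
    · rintro ⟨hx, hmod⟩
      refine ⟨hx, ?_⟩
      rw [PySem.Int.mod_eq_emod_of_pos (by norm_num : (0:Int) < 2)]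
      omega
  have hnodL : L.Nodup := by rw [hL]; exact (PySem.Set.nodup_ofList cs).filter _
  have hnodM : (L.map Char.toNat).Nodup := by
    refine List.Nodup.map ?_ hnodL
    intro a b hab
    exact char_toNat_inj hab
  have hnodR : ((List.range 128).filter (fun i => mask.testBit i)).Nodup :=
    (List.nodup_range).filter _
  have hmem : ∀ i : Nat, i ∈ L.map Char.toNat ↔ i ∈ (List.range 128).filter (fun i => mask.testBit i) := by
    intro i
    simp only [List.mem_map, List.mem_filter, List.mem_range, hbit, decide_eq_true_eq]
    constructor
    · rintro ⟨x, hxL, rfl⟩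
      rcases (hmemL x).mp hxL with ⟨hxcs, hodd⟩
      refine ⟨hcs x hxcs, ?_⟩
      rw [← hcount x]; exact hodd
    · rintro ⟨hi, hodd⟩
      have hpos : 0 < cs.countP (fun c => c.toNat == i) := by omega
      rcases List.countP_pos_iff.mp hpos with ⟨x, hxcs, hx⟩
      have hxi : x.toNat = i := by simpa using hx
      refine ⟨x, (hmemL x).mpr ⟨hxcs, ?_⟩, hxi⟩
      rw [hcount x, hxi]; exact hodd
  calc L.length = (L.map Char.toNat).length := (List.length_map _).symm
    _ = ((List.range 128).filter (fun i => mask.testBit i)).length :=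
        ((List.perm_ext_iff_of_nodup hnodM hnodR).mpr hmem).length_eq

-- ===== VERDICT (by name: the statement is the Claim_ definition above) =====
theorem chars_to_peragram_spec : Claim_equal_chars_to_peragram := by
  intro word hdom
  unfold Spec_chars_to_peragram chars_to_peragram chars_to_peragram_alt
  dsimp only
  set cs := word.toList with hcs
  have hcodes : ∀ c ∈ cs, c.toNat < 128 := by
    intro c hc
    have := List.all_eq_true.mp hdom c hc
    simp only [pvDomChar, Bool.or_eq_true, Bool.and_eq_true, decide_eq_true_eq, beq_iff_eq] at this
    omega
  rw [show cs.foldl (fun d c => d.modify c 0 (· + 1)) PySem.Dict.empty = PySem.Dict.counter cs from rfl,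
      PySem.Dict.items_counter, List.filter_map, List.foldl_map]
  simp only [Function.comp_def]
  set L := (PySem.Set.ofList cs).filter
      (fun k => PySem.Int.mod (cs.count k : Int) 2 == 1) with hL
  have hnodL : L.Nodup := by
    rw [hL]; exact (PySem.Set.nodup_ofList cs).filter _
  simp only [PySem.Dict.size]
  rw [PySem.Dict.items_foldl_insert_fresh (k := fun a => a)
        (v := fun a => PySem.Int.mod ((cs.count a : Int)) 2) (d := PySem.Dict.empty) (l := L)
        (by intro a _; rfl)
        (by simpa using hnodL)]
  simp only [PySem.Dict.empty, List.nil_append, List.length_map]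
  rw [hL, odd_list_length_eq_bits cs hcodes]
  split_ifs with h0
  · norm_num [h0]
  · rw [max_eq_right (by omega)]
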